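-- pv_equiv track=rewrite | github.com/abhikpadhy/Amrita_daly_coding | subarry_problems.py | maximum_difference_in_array
-- ===== SOURCE A (Python) =====
-- def maximum_difference_in_array(arr,k):
--     "Find the maximum difference betwen 'k' and  the elements of an array"
--     arr.sort()
--     max_diff = 0
--     for i in range(len(arr)):
--         if arr[i] > k:
--             max_diff = max((arr[i] - k),max_diff)
--         elif arr[i] < k:
--             max_diff = max((k-arr[i]),max_diff)
--         elif arr[i] == k:
--              max_diff = max((arr[i] - k),max_diff)
--     return   max_diff
-- ===== SOURCE B (Python) =====
-- def maximum_difference_in_array(arr, k):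
--     "Find the maximum difference betwen 'k' and  the elements of an array"
--     arr.sort()
--     if not arr:
--         return 0
--     return max(0, arr[-1] - k, k - arr[0])
-- ===== Notes on version B (the rewrite author's own statement) =====
-- stated objective: simpler
-- what changed: Instead of scanning every element, B sorts (keeping A's in-place mutation) and reads the answer off the two endpoints: max(0, arr[-1]-k, k-arr[0]).
import Mathlib
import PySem

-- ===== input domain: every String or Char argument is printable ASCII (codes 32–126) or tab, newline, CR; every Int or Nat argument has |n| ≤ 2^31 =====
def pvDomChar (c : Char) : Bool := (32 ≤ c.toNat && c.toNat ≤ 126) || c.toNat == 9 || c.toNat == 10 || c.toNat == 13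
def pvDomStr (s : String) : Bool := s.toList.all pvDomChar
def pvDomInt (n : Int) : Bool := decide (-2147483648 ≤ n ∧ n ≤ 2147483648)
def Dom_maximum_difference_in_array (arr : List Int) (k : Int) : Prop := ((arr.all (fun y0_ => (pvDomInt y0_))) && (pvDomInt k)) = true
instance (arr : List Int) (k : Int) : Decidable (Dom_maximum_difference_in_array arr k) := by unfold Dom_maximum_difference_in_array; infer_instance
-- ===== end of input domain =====

-- B replaces A's full scan by reading the two endpoints of the sorted list (objective: simpler).
-- Both versions sort the list; in Python both mutate `arr` in place identically — the equivalence proved here is about the return value.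

-- ===== PORT A =====
def maximum_difference_in_array (arr : List Int) (k : Int) : Int :=
  let a := PySem.List.sorted arr (fun x => x) false
  (PySem.List.pyRange 0 (PySem.List.len a) 1).foldl
    (fun max_diff i =>
      let x := PySem.List.pyGetD a i 0
      if x > k then max (x - k) max_diff
      else if x < k then max (k - x) max_diff
      else if x = k then max (x - k) max_diff
      else max_diff) 0

-- ===== PORT B =====
def maximum_difference_in_array_alt (arr : List Int) (k : Int) : Int :=
  let a := PySem.List.sorted arr (fun x => x) false
  match a with
  | [] => 0
  | x :: xs => max (max 0 (xs.getLastD x - k)) (k - x)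

-- ===== PRECONDITION & SPEC =====
def Spec_maximum_difference_in_array (arr : List Int) (k : Int) (out : Int) : Prop := out = maximum_difference_in_array_alt arr k
instance (arr : List Int) (k : Int) (out : Int) : Decidable (Spec_maximum_difference_in_array arr k out) := by unfold Spec_maximum_difference_in_array; infer_instance

-- ===== CLAIM (what is proved, stated in full; the proofs are below) =====
def Claim_equal_maximum_difference_in_array : Prop := ∀ (arr : List Int) (k : Int), Dom_maximum_difference_in_array arr k → Spec_maximum_difference_in_array arr k (maximum_difference_in_array arr k)

-- ===== LEMMAS AND PROOFS =====

-- A's loop body equals the symmetric max step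
theorem pv_step_eq (k max_diff x : Int) :
    (if x > k then max (x - k) max_diff
     else if x < k then max (k - x) max_diff
     else if x = k then max (x - k) max_diff
     else max_diff) = max (max (x - k) (k - x)) max_diff := by
  split_ifs <;> omega

theorem pv_getLastD_mem_cons (ys : List Int) (y : Int) : ys.getLastD y ∈ y :: ys := by
  induction ys generalizing y with
  | nil => simp
  | cons z zs ih =>
    rw [List.getLastD_cons]
    exact List.mem_cons_of_mem y (ih z)

-- A's fold over a sorted (≤-pairwise) nonempty list, in closed form on the endpoints.
theorem pv_fold_sorted (k : Int) (xs : List Int) (x a : Int)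
    (h : (x :: xs).Pairwise (· ≤ ·)) :
    (x :: xs).foldl (fun max_diff y => max (max (y - k) (k - y)) max_diff) a
      = max a (max (xs.getLastD x - k) (k - x)) := by
  induction xs generalizing x a with
  | nil => simp [List.foldl]; omega
  | cons y ys ih =>
    have hxy : x ≤ y := (List.pairwise_cons.mp h).1 y (by simp)
    have hL : ys.getLastD y ∈ y :: ys := pv_getLastD_mem_cons ys y
    have hxL : x ≤ ys.getLastD y := (List.pairwise_cons.mp h).1 _ hL
    have htail : (y :: ys).Pairwise (· ≤ ·) := (List.pairwise_cons.mp h).2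
    have := ih y (max (max (x - k) (k - x)) a) htail
    simp only [List.foldl_cons] at this ⊢
    rw [this, List.getLastD_cons]
    omega

-- ===== VERDICT (by name: the statement is the Claim_ definition above) =====
theorem maximum_difference_in_array_spec : Claim_equal_maximum_difference_in_array := by
  intro arr k _
  unfold Spec_maximum_difference_in_array maximum_difference_in_array maximum_difference_in_array_alt
  simp only []
  rw [PySem.List.foldl_pyRange_zero_pyGetD (PySem.List.sorted arr (fun x => x) false) (0 : Int)
    (fun max_diff x =>
      if x > k then max (x - k) max_diff
      else if x < k then max (k - x) max_diff
      else if x = k then max (x - k) max_diff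
      else max_diff) 0]
  simp only [pv_step_eq]
  have hpw := PySem.List.sorted_pairwise (xs := arr) (key := fun x => x)
  cases hs : PySem.List.sorted arr (fun x => x) false with
  | nil => simp
  | cons x xs =>
    rw [hs] at hpw
    rw [pv_fold_sorted k xs x 0 hpw]
    show max 0 (max (xs.getLastD x - k) (k - x)) = max (max 0 (xs.getLastD x - k)) (k - x)
    omega
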